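-- pv_equiv track=rewrite | github.com/CoffeeFlux/NSHG-Tools | nshg/dxt.py | expand_clusters
-- ===== SOURCE A (Python) =====
-- import io, collections, math, copy
--
-- def expand_clusters(clusters, reverse=False):
--     output = collections.deque()
--     for row in clusters:
--         row1 = []
--         row2 = []
--         row3 = []
--         row4 = []
--         for cluster in row:
--             for pixel in cluster[0]:
--                 row1.extend(pixel)
--             for pixel in cluster[1]:
--                 row2.extend(pixel)
--             for pixel in cluster[2]:
--                 row3.extend(pixel)
--             for pixel in cluster[3]:
--                 row4.extend(pixel)
--         if reverse:
--             output.extendleft([row1, row2, row3, row4])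
--         else:
--             output.extend([row1, row2, row3, row4])
--     return list(output)
-- ===== SOURCE B (Python) =====
-- def expand_clusters(clusters, reverse=False):
--     output = []
--     for row in clusters:
--         for i in range(4):
--             output.append([x for cluster in row for pixel in cluster[i] for x in pixel])
--     if reverse:
--         output.reverse()
--     return output
-- ===== Notes on version B (the rewrite author's own statement) =====
-- stated objective: simpler
-- what changed: Builds the output in natural order with one per-component flattening comprehension per row (instead of four accumulator lists per row) and replaces the deque with per-row extendleft by a single final list.reverse().
import Mathlib
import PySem

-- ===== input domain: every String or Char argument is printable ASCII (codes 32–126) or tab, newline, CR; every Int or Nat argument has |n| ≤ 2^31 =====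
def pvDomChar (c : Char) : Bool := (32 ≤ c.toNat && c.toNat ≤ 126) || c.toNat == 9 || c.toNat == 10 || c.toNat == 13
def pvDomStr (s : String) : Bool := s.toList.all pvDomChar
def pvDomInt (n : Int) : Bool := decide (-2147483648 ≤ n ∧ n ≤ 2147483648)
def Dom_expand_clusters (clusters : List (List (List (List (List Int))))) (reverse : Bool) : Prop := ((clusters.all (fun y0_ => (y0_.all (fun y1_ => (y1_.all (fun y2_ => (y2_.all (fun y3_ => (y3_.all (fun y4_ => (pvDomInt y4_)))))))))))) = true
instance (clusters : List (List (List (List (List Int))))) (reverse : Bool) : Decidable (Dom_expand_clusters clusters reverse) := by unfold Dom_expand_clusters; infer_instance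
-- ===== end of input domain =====

-- B builds the output in natural order with one flattening comprehension per component per row,
-- and performs the reverse-mode reversal once at the end instead of per-row deque.extendleft.

-- ===== PORT A =====
-- deque modeled as a List; extendleft([a,b,c,d]) prepends each element in turn.
def expand_clusters (clusters : List (List (List (List (List Int))))) (reverse : Bool) : List (List Int) :=
  let output : List (List Int) :=
    clusters.foldl (fun output row =>
      let row1 := row.foldl (fun acc c => ((PySem.List.pyGet? c 0).getD []).foldl (fun a p => a ++ p) acc) []
      let row2 := row.foldl (fun acc c => ((PySem.List.pyGet? c 1).getD []).foldl (fun a p => a ++ p) acc) []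
      let row3 := row.foldl (fun acc c => ((PySem.List.pyGet? c 2).getD []).foldl (fun a p => a ++ p) acc) []
      let row4 := row.foldl (fun acc c => ((PySem.List.pyGet? c 3).getD []).foldl (fun a p => a ++ p) acc) []
      if reverse then
        [row1, row2, row3, row4].foldl (fun o r => r :: o) output
      else
        output ++ [row1, row2, row3, row4]) []
  output

-- ===== PORT B =====
def expand_clusters_alt (clusters : List (List (List (List (List Int))))) (reverse : Bool) : List (List Int) :=
  let output : List (List Int) :=
    clusters.foldl (fun output row =>
      (PySem.List.pyRange 0 4 1).foldl (fun output i =>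
        output ++ [row.flatMap (fun c => ((PySem.List.pyGet? c i).getD []).flatMap (fun p => p))]) output) []
  if reverse then output.reverse else output

-- ===== PRECONDITION & SPEC =====
-- Pre_ excludes inputs where some cluster has fewer than 4 component lists: there Python A (and B) raise IndexError.
def Pre_expand_clusters (clusters : List (List (List (List (List Int))))) (reverse : Bool) : Prop :=
  ∀ row ∈ clusters, ∀ c ∈ row, 4 ≤ c.length
instance (clusters : List (List (List (List (List Int))))) (reverse : Bool) : Decidable (Pre_expand_clusters clusters reverse) := by unfold Pre_expand_clusters; infer_instance

def pvWitness_expand_clusters : List (List (List (List (List Int)))) × Bool :=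
  ([[[[[1, 2]], [[3]], [[4]], [[5, 6]]]]], true)

def Spec_expand_clusters (clusters : List (List (List (List (List Int))))) (reverse : Bool) (out : List (List Int)) : Prop := out = expand_clusters_alt clusters reverse
instance (clusters : List (List (List (List (List Int))))) (reverse : Bool) (out : List (List Int)) : Decidable (Spec_expand_clusters clusters reverse out) := by unfold Spec_expand_clusters; infer_instance

-- ===== CLAIM (what is proved, stated in full; the proofs are below) =====
def Claim_equal_expand_clusters : Prop := ∀ (clusters : List (List (List (List (List Int))))) (reverse : Bool), Dom_expand_clusters clusters reverse → Pre_expand_clusters clusters reverse → Spec_expand_clusters clusters reverse (expand_clusters clusters reverse)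

-- ===== LEMMAS AND PROOFS =====

def pvComp (row : List (List (List (List Int)))) (i : Int) : List Int :=
  row.flatMap (fun c => ((PySem.List.pyGet? c i).getD []).flatMap (fun p => p))

-- B's per-row group of four lists.
def pvGroup (row : List (List (List (List Int)))) : List (List Int) :=
  [pvComp row 0, pvComp row 1, pvComp row 2, pvComp row 3]

theorem pvFoldlAppend (l : List (List Int)) (acc : List Int) :
    l.foldl (fun a p => a ++ p) acc = acc ++ l.flatten := by
  induction l generalizing acc with
  | nil => simp
  | cons h t ih => simp [List.foldl, ih]

theorem pvRowFold (row : List (List (List (List Int)))) (i : Int) (acc : List Int) :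
    row.foldl (fun acc c => ((PySem.List.pyGet? c i).getD []).foldl (fun a p => a ++ p) acc) acc
      = acc ++ pvComp row i := by
  induction row generalizing acc with
  | nil => simp [pvComp]
  | cons h t ih => simp [List.foldl, pvFoldlAppend, pvComp, List.flatMap]

theorem pvAForward (clusters : List (List (List (List (List Int))))) (acc : List (List Int)) :
    clusters.foldl (fun output row =>
      let row1 := row.foldl (fun acc c => ((PySem.List.pyGet? c 0).getD []).foldl (fun a p => a ++ p) acc) []
      let row2 := row.foldl (fun acc c => ((PySem.List.pyGet? c 1).getD []).foldl (fun a p => a ++ p) acc) []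
      let row3 := row.foldl (fun acc c => ((PySem.List.pyGet? c 2).getD []).foldl (fun a p => a ++ p) acc) []
      let row4 := row.foldl (fun acc c => ((PySem.List.pyGet? c 3).getD []).foldl (fun a p => a ++ p) acc) []
      output ++ [row1, row2, row3, row4]) acc
      = acc ++ clusters.flatMap pvGroup := by
  induction clusters generalizing acc with
  | nil => simp
  | cons h t ih =>
      rw [List.foldl_cons, ih]
      simp [pvRowFold, pvGroup, List.flatMap]

theorem pvAReverse (clusters : List (List (List (List (List Int))))) (acc : List (List Int)) :
    clusters.foldl (fun output row =>
      let row1 := row.foldl (fun acc c => ((PySem.List.pyGet? c 0).getD []).foldl (fun a p => a ++ p) acc) []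
      let row2 := row.foldl (fun acc c => ((PySem.List.pyGet? c 1).getD []).foldl (fun a p => a ++ p) acc) []
      let row3 := row.foldl (fun acc c => ((PySem.List.pyGet? c 2).getD []).foldl (fun a p => a ++ p) acc) []
      let row4 := row.foldl (fun acc c => ((PySem.List.pyGet? c 3).getD []).foldl (fun a p => a ++ p) acc) []
      [row1, row2, row3, row4].foldl (fun o r => r :: o) output) acc
      = (clusters.flatMap pvGroup).reverse ++ acc := by
  induction clusters generalizing acc with
  | nil => simp
  | cons h t ih =>
      rw [List.foldl_cons, ih]
      simp [pvRowFold, pvGroup, List.flatMap]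

theorem pvAltFlat (clusters : List (List (List (List (List Int))))) (acc : List (List Int)) :
    clusters.foldl (fun output row =>
      (PySem.List.pyRange 0 4 1).foldl (fun output i =>
        output ++ [row.flatMap (fun c => ((PySem.List.pyGet? c i).getD []).flatMap (fun p => p))]) output) acc
    = acc ++ clusters.flatMap pvGroup := by
  induction clusters generalizing acc with
  | nil => simp
  | cons h t ih =>
      rw [List.foldl_cons, ih]
      rw [show PySem.List.pyRange 0 4 1 = [0, 1, 2, 3] from by decide]
      simp [pvGroup, pvComp]

-- ===== VERDICT (by name: the statement is the Claim_ definition above) =====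
theorem expand_clusters_spec : Claim_equal_expand_clusters := by
  intro clusters reverse _ _
  unfold Spec_expand_clusters expand_clusters expand_clusters_alt
  rw [pvAltFlat]
  cases reverse with
  | false => simp only [Bool.false_eq_true, if_false, pvAForward, List.nil_append]
  | true => simp only [if_true, pvAReverse, List.append_nil, List.nil_append]
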